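-- pv_equiv track=rewrite | github.com/mbaddar1/coding | contigous_subarrays.py | max_backward
-- ===== SOURCE A (Python) =====
-- def max_backward(arr):
--     n = len(arr)
--     if n == 0:
--         return []
--     max_vals = list()
--     max_vals.append((arr[n - 1], n - 1))
--     max_entry = (arr[n - 1], n - 1)
--     for i in range(n - 2, -1, -1):
--         if arr[i] > max_entry[0]:
--             max_entry = arr[i], i
--         max_vals.insert(0, max_entry)
--     return max_vals
-- ===== SOURCE B (Python) =====
-- def max_backward(arr):
--     # Forward monotonic-stack algorithm, O(n):
--     # 1) one left-to-right pass keeps the "suffix-max records" (elements strictly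
--     #    greater than everything to their right) on a stack;
--     # 2) each record (v, j) is the answer for every position from the previous
--     #    record's index + 1 up to j, so the output is its run-length expansion.
--     records = []
--     for i, x in enumerate(arr):
--         while records and records[-1][0] <= x:
--             records.pop()
--         records.append((x, i))
--     out = []
--     prev = -1
--     for v, j in records:
--         out.extend([(v, j)] * (j - prev))
--         prev = j
--     return out
-- ===== Notes on version B (the rewrite author's own statement) =====
-- stated objective: faster
-- what changed: Replaces A's backward running-max scan with O(n^2) insert(0,...) by a forward monotonic-stack pass that collects the suffix-max records and then run-length-expands them into the answer, O(n) total.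
import Mathlib
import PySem

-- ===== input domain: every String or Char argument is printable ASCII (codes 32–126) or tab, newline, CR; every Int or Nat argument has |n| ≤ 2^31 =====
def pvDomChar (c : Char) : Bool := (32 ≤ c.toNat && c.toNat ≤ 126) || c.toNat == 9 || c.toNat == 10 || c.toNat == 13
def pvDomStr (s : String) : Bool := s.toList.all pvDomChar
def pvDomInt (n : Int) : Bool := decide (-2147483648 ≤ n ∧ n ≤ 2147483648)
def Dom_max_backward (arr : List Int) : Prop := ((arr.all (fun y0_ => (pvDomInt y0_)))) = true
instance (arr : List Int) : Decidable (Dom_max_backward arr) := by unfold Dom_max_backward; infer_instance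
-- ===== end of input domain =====

-- B replaces A's backward running-max scan (quadratic via insert(0, ..)) by a forward
-- monotonic-stack pass plus a run-length expansion of the records (objective: faster).

-- ===== PORT A =====
def max_backward (arr : List Int) : List (Int × Int) :=
  let n : Int := arr.length
  if n = 0 then []
  else
    -- arr[n-1]: index always in range here, so the pyGet? never misses; 0 is a dead default
    let last : Int := (PySem.List.pyGet? arr (n - 1)).getD 0
    let init : List (Int × Int) × (Int × Int) := ([(last, n - 1)], (last, n - 1))
    let res := (PySem.List.pyRange (n - 2) (-1) (-1)).foldl
      (fun (st : List (Int × Int) × (Int × Int)) (i : Int) =>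
        let ai : Int := (PySem.List.pyGet? arr i).getD 0
        let me : Int × Int := if ai > st.2.1 then (ai, i) else st.2
        (me :: st.1, me)) init
    res.1

-- ===== PORT B =====
-- the 'while records and records[-1][0] <= x: records.pop()' + 'records.append((x, i))' body;
-- Source B keeps the stack top at the END of the list, the port keeps it at the HEAD (same stack).
def pvPush (S : List (Int × Int)) (x : Int) (i : Int) : List (Int × Int) :=
  match S with
  | [] => [(x, i)]
  | (v, j) :: rest => if v ≤ x then pvPush rest x i else (x, i) :: (v, j) :: rest

def max_backward_alt (arr : List Int) : List (Int × Int) :=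
  let records := (PySem.List.enumerate arr 0).foldl (fun S e => pvPush S e.2 e.1) []
  -- second loop: 'for v, j in records: out.extend([(v,j)]*(j-prev)); prev = j'
  -- (records in Source B's order = reverse of the head-at-top stack)
  (records.reverse.foldl
    (fun (st : List (Int × Int) × Int) e =>
      (st.1 ++ List.replicate (e.2 - st.2).toNat e, e.2)) ([], -1)).1

-- ===== PRECONDITION & SPEC =====
def Spec_max_backward (arr : List Int) (out : List (Int × Int)) : Prop := out = max_backward_alt arr
instance (arr : List Int) (out : List (Int × Int)) : Decidable (Spec_max_backward arr out) := by unfold Spec_max_backward; infer_instance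

-- ===== CLAIM (what is proved, stated in full; the proofs are below) =====
def Claim_equal_max_backward : Prop := ∀ (arr : List Int), Dom_max_backward arr → Spec_max_backward arr (max_backward arr)

-- ===== LEMMAS AND PROOFS =====

-- Reference: the suffix-max entry list, structurally from the right, with explicit start index.
def refAux : List Int → Int → List (Int × Int)
  | [], _ => []
  | x :: xs, i =>
    match refAux xs (i + 1) with
    | [] => [(x, i)]
    | e :: r => (if x > e.1 then (x, i) else e) :: e :: r

-- Run-length expansion of a record list, with running previous index.
def expand (p : Int) : List (Int × Int) → List (Int × Int)
  | [] => []
  | e :: R => List.replicate (e.2 - p).toNat e ++ expand e.2 R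

-- index of the last record, default p
def lastIdx (p : Int) : List (Int × Int) → Int
  | [] => p
  | e :: R => lastIdx e.2 R

-- Stack invariant (head = top): values strictly increase and indices strictly
-- decrease toward the tail; all indices are nonnegative.
def OrdS (S : List (Int × Int)) : Prop :=
  S.Pairwise (fun a b => a.1 < b.1 ∧ b.2 < a.2) ∧ ∀ e ∈ S, 0 ≤ e.2

theorem refAux_nil_iff (l : List Int) (i : Int) : refAux l i = [] ↔ l = [] := by
  cases l with
  | nil => simp [refAux]
  | cons x xs =>
    simp only [refAux]
    cases refAux xs (i + 1) <;> simp

theorem refAux_append (l : List Int) (y : Int) : ∀ i : Int,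
    refAux (l ++ [y]) i
      = (refAux l i).map (fun e => if e.1 ≤ y then (y, i + l.length) else e)
        ++ [(y, i + l.length)] := by
  induction l with
  | nil => intro i; simp [refAux]
  | cons x xs ih =>
    intro i
    have hlen : i + 1 + (xs.length : Int) = i + ((xs.length : Int) + 1) := by ring
    simp only [List.cons_append, refAux, ih (i + 1), hlen, List.length_cons]
    cases hxs : refAux xs (i + 1) with
    | nil =>
      have : xs = [] := (refAux_nil_iff xs (i + 1)).1 hxs
      subst this
      simp only [List.length_nil, List.map_nil, List.nil_append]
      push_cast
      split_ifs <;> simp_all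
    | cons e r =>
      simp only [List.map_cons, List.cons_append]
      congr 1
      push_cast
      split_ifs <;> simp_all <;> omega

-- A's fold, from index k down, started at the state for the suffix beginning at k,
-- computes the full reference list.
theorem A_loop (arr : List Int) : ∀ (k : Nat), k < arr.length →
    ((PySem.List.pyRange ((k : Int) - 1) (-1) (-1)).foldl
      (fun (st : List (Int × Int) × (Int × Int)) (i : Int) =>
        let ai : Int := (PySem.List.pyGet? arr i).getD 0
        let me : Int × Int := if ai > st.2.1 then (ai, i) else st.2
        (me :: st.1, me))
      (refAux (arr.drop k) k, (refAux (arr.drop k) k).headD (0, 0)))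
    = (refAux arr 0, (refAux arr 0).headD (0, 0)) := by
  intro k
  induction k with
  | zero => intro _; simp [PySem.List.pyRange_neg_one_eq_nil]
  | succ k ih =>
    intro hk
    have hk' : k < arr.length := Nat.lt_of_succ_lt hk
    have hcons : PySem.List.pyRange (((k : Nat) + 1 : Int) - 1) (-1) (-1)
        = (k : Int) :: PySem.List.pyRange ((k : Int) - 1) (-1) (-1) := by
      have := PySem.List.pyRange_neg_one_cons (a := (k : Int)) (b := -1) (by omega)
      simpa using this
    have hget : (PySem.List.pyGet? arr (k : Int)).getD 0 = arr[k]'hk' := by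
      rw [PySem.List.pyGet?_natCast]; simp [hk']
    have hdrop : arr.drop k = arr[k]'hk' :: arr.drop (k + 1) := List.drop_eq_getElem_cons hk'
    have hstep : refAux (arr.drop k) k
        = (if arr[k]'hk' > ((refAux (arr.drop (k+1)) ((k:Int)+1)).headD (0,0)).1
            then (arr[k]'hk', (k : Int))
            else (refAux (arr.drop (k+1)) ((k:Int)+1)).headD (0,0))
          :: refAux (arr.drop (k+1)) ((k:Int)+1) := by
      rw [hdrop]
      simp only [refAux]
      cases hx : refAux (arr.drop (k+1)) ((k:Int)+1) with
      | nil =>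
        exfalso
        have h1 : arr.drop (k+1) = [] := (refAux_nil_iff _ _).1 hx
        have h2 : arr.length - (k + 1) = 0 := by
          simpa using congrArg List.length h1
        omega
      | cons e r => simp
    push_cast
    rw [hcons, List.foldl_cons]
    have := ih hk'
    push_cast at this
    rw [← this]
    congr 1
    rw [hstep]
    simp [List.getElem?_eq_getElem hk']

theorem A_eq_ref (arr : List Int) : max_backward arr = refAux arr 0 := by
  unfold max_backward
  by_cases h : arr.length = 0
  · simp [List.eq_nil_of_length_eq_zero h, refAux]
  · have hn : 0 < arr.length := Nat.pos_of_ne_zero h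
    have hpred : arr.length - 1 < arr.length := by omega
    have hlast : (PySem.List.pyGet? arr ((arr.length : Int) - 1)).getD 0
        = arr[arr.length - 1]'hpred := by
      have : ((arr.length : Int) - 1) = ((arr.length - 1 : Nat) : Int) := by push_cast [hn]; omega
      rw [this, PySem.List.pyGet?_natCast]; simp [hpred]
    have hdrop : arr.drop (arr.length - 1) = [arr[arr.length - 1]'hpred] := by
      have := List.drop_eq_getElem_cons hpred
      simpa [List.drop_eq_nil_of_le (le_refl arr.length), show arr.length - 1 + 1 = arr.length by omega] using this
    have hinit : refAux (arr.drop (arr.length - 1)) ((arr.length : Int) - 1)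
        = [(arr[arr.length - 1]'hpred, (arr.length : Int) - 1)] := by
      rw [hdrop]; simp [refAux]
    have hloop := A_loop arr (arr.length - 1) hpred
    have hcast : ((arr.length - 1 : Nat) : Int) = (arr.length : Int) - 1 := by push_cast [hn]; omega
    rw [hcast] at hloop
    rw [hinit] at hloop
    simp only [if_neg (show ¬ ((arr.length : Int) = 0) by exact_mod_cast h)]
    have hrange : (arr.length : Int) - 2 = ((arr.length : Int) - 1) - 1 := by ring
    rw [hlast, hrange]
    calc _ = (refAux arr 0, (refAux arr 0).headD (0,0)).1 := by rw [← hloop]; simp [List.headD]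
    _ = refAux arr 0 := rfl

theorem lastIdx_append_singleton (R : List (Int × Int)) (e : Int × Int) : ∀ p : Int,
    lastIdx p (R ++ [e]) = e.2 := by
  induction R with
  | nil => intro p; simp [lastIdx]
  | cons a T ih => intro p; simp [lastIdx, ih]

theorem expand_append (R R' : List (Int × Int)) : ∀ p : Int,
    expand p (R ++ R') = expand p R ++ expand (lastIdx p R) R' := by
  induction R with
  | nil => intro p; simp [expand, lastIdx]
  | cons e T ih =>
    intro p
    simp only [List.cons_append, expand, lastIdx, ih e.2, List.append_assoc]

theorem expand_mem {a : Int × Int} : ∀ (R : List (Int × Int)) (p : Int), a ∈ expand p R → a ∈ R := by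
  intro R
  induction R with
  | nil => intro p h; simp [expand] at h
  | cons e T ih =>
    intro p h
    simp only [expand, List.mem_append] at h
    rcases h with h | h
    · exact List.mem_cons.2 (Or.inl (List.eq_of_mem_replicate h))
    · exact List.mem_cons.2 (Or.inr (ih _ h))

theorem expand_length : ∀ (R : List (Int × Int)) (p : Int),
    (R.Pairwise (fun a b => a.2 < b.2)) → (∀ e ∈ R, p < e.2) →
    ((expand p R).length : Int) = lastIdx p R - p := by
  intro R
  induction R with
  | nil => intro p _ _; simp [expand, lastIdx]
  | cons e T ih =>
    intro p hpw hlt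
    have hpe : p < e.2 := hlt e (by simp)
    have hT : ∀ b ∈ T, e.2 < b.2 := fun b hb => (List.pairwise_cons.1 hpw).1 b hb
    have := ih e.2 (List.pairwise_cons.1 hpw).2 hT
    simp only [expand, lastIdx, List.length_append, List.length_replicate]
    push_cast
    omega

theorem pvPush_eq (S : List (Int × Int)) (y n : Int) :
    pvPush S y n = (y, n) :: S.dropWhile (fun e => decide (e.1 ≤ y)) := by
  induction S with
  | nil => simp [pvPush, List.dropWhile]
  | cons e T ih =>
    obtain ⟨v, j⟩ := e
    by_cases h : v ≤ y <;> simp [pvPush, List.dropWhile, h, ih]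

theorem expand_push (S : List (Int × Int)) (y n : Int)
    (hOrd : OrdS S)
    (hhead : ∀ e T, S = e :: T → e.2 = n - 1)
    (hnil : S = [] → n = 0) :
    expand (-1) (pvPush S y n).reverse
      = (expand (-1) S.reverse).map (fun e => if e.1 ≤ y then (y, n) else e) ++ [(y, n)] := by
  obtain ⟨hpw, hnn⟩ := hOrd
  set f : Int × Int → Bool := fun e => decide (e.1 ≤ y) with hf
  set P := S.takeWhile f with hP
  set K := S.dropWhile f with hK
  have hPK : P ++ K = S := List.takeWhile_append_dropWhile
  -- every kept element has value > y
  have hKgt : ∀ e ∈ K, y < e.1 := by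
    cases hKc : K with
    | nil => simp
    | cons k ks =>
      intro e he
      have hKc' := hKc
      rw [hK] at hKc'
      have hkf : ¬ f k = true := by
        have h1 := List.head_dropWhile_not f (l := S) (by simp [hKc'])
        simpa [hKc'] using h1
      have hky : y < k.1 := by simpa [hf] using hkf
      rcases List.mem_cons.1 he with rfl | he'
      · exact hky
      · have hKpw : K.Pairwise (fun a b => a.1 < b.1 ∧ b.2 < a.2) :=
          hpw.sublist (by rw [hK]; exact List.dropWhile_sublist f)
        rw [hKc] at hKpw
        exact lt_trans hky ((List.pairwise_cons.1 hKpw).1 e he').1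
  have hPle : ∀ e ∈ P, e.1 ≤ y := by
    intro e he
    have := List.mem_takeWhile_imp (by rw [← hP]; exact he)
    simpa [hf] using this
  -- q: the previous index for the expansion of the popped part
  set q := lastIdx (-1) K.reverse with hq
  have hKq : ∀ k ks, K = k :: ks → q = k.2 := by
    intro k ks hKc
    rw [hq, hKc, show (k :: ks).reverse = ks.reverse ++ [k] by simp, lastIdx_append_singleton]
  -- LHS
  have hpush : pvPush S y n = (y, n) :: K := by rw [pvPush_eq, hK]
  have hLHS : expand (-1) (pvPush S y n).reverse
      = expand (-1) K.reverse ++ List.replicate (n - q).toNat (y, n) := by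
    rw [hpush, show ((y, n) :: K).reverse = K.reverse ++ [(y, n)] by simp,
      expand_append, ← hq]
    simp [expand]
  -- RHS decomposition
  have hSrev : S.reverse = K.reverse ++ P.reverse := by rw [← hPK]; simp
  have hRHS1 : expand (-1) S.reverse = expand (-1) K.reverse ++ expand q P.reverse := by
    rw [hSrev, expand_append, ← hq]
  -- map leaves the K part alone
  have hmapK : (expand (-1) K.reverse).map (fun e => if e.1 ≤ y then (y, n) else e)
      = expand (-1) K.reverse := by
    rw [List.map_congr_left (g := id), List.map_id]
    intro e he
    have : e ∈ K := by simpa using expand_mem _ _ he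
    simp [show ¬ e.1 ≤ y by have := hKgt e this; omega]
  -- map sends the P part to copies of (y, n)
  have hmapP : (expand q P.reverse).map (fun e => if e.1 ≤ y then (y, n) else e)
      = List.replicate (expand q P.reverse).length (y, n) := by
    rw [List.map_congr_left (g := fun _ => (y, n))]
    · simp [List.map_const']
    · intro e he
      have : e ∈ P := by simpa using expand_mem _ _ he
      simp [hPle e this]
  cases hPc : P with
  | nil =>
    -- nothing was popped: the expansion grows by exactly one copy of (y, n)
    have hKSeq : K = S := by rw [← hPK, hPc]; rfl
    have hq' : q = n - 1 := by
      cases hS : S with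
      | nil =>
        have hK0 : K = [] := by rw [hKSeq, hS]
        have : q = -1 := by rw [hq, hK0]; rfl
        rw [this, hnil hS]; decide
      | cons e T =>
        have hKc : K = e :: T := by rw [hKSeq, hS]
        rw [hKq e T hKc, hhead e T hS]
    rw [hLHS, hRHS1, hPc, List.map_append, hmapK]
    simp [expand, hq']
  | cons a l =>
    have hS : S = a :: (l ++ K) := by rw [← hPK, hPc]; simp
    have ha2 : a.2 = n - 1 := hhead a (l ++ K) hS
    have hPn : lastIdx q P.reverse = n - 1 := by
      rw [hPc, show (a :: l).reverse = l.reverse ++ [a] by simp, lastIdx_append_singleton, ha2]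
    have hPpw : P.reverse.Pairwise (fun a b => a.2 < b.2) := by
      rw [List.pairwise_reverse]
      exact (hpw.sublist (by rw [hP]; exact List.takeWhile_sublist f)).imp (fun h => h.2)
    have hqP : ∀ e ∈ P.reverse, q < e.2 := by
      intro e he
      rw [List.mem_reverse] at he
      have heS : e ∈ S := by rw [← hPK]; exact List.mem_append.2 (Or.inl he)
      cases hKc : K with
      | nil =>
        have : q = -1 := by rw [hq, hKc]; rfl
        have := hnn e heS
        omega
      | cons k ks =>
        rw [hKq k ks hKc]
        have hpw' := hpw
        rw [← hPK, hKc] at hpw'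
        exact ((List.pairwise_append.1 hpw').2.2 e he k (by simp)).2
    have hlen : ((expand q P.reverse).length : Int) = (n - 1) - q := by
      rw [expand_length P.reverse q hPpw hqP, hPn]
    have hqn : q ≤ n - 1 := by
      have : a ∈ P.reverse := by rw [hPc]; simp
      have := hqP a this
      omega
    rw [hLHS, hRHS1, List.map_append, hmapK, hmapP, List.append_assoc]
    congr 1
    have hnat : (n - q).toNat = (expand q P.reverse).length + 1 := by omega
    rw [hnat, List.replicate_succ']

-- The full invariant of the first loop's stack.
def StackInv (arr : List Int) (S : List (Int × Int)) : Prop :=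
  OrdS S ∧ (S = [] → arr = []) ∧ (∀ e T, S = e :: T → e.2 = (arr.length : Int) - 1) ∧
    (∀ e ∈ S, e.2 < (arr.length : Int)) ∧
    expand (-1) S.reverse = refAux arr 0

def stackOf (arr : List Int) : List (Int × Int) :=
  (PySem.List.enumerate arr 0).foldl (fun S e => pvPush S e.2 e.1) []

theorem enumerate_append_singleton (l : List Int) (y : Int) : ∀ s : Int,
    PySem.List.enumerate (l ++ [y]) s = PySem.List.enumerate l s ++ [(s + l.length, y)] := by
  induction l with
  | nil => intro s; simp [PySem.List.enumerate_cons, PySem.List.enumerate_nil]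
  | cons x xs ih =>
    intro s
    simp only [List.cons_append, PySem.List.enumerate_cons, ih (s + 1), List.cons_append,
      List.length_cons]
    norm_num
    ring

theorem stackOf_append (arr : List Int) (y : Int) :
    stackOf (arr ++ [y]) = pvPush (stackOf arr) y arr.length := by
  simp [stackOf, enumerate_append_singleton, List.foldl_append]

theorem stack_inv (arr : List Int) : StackInv arr (stackOf arr) := by
  induction arr using List.reverseRecOn with
  | nil =>
    refine ⟨⟨by simp [stackOf, PySem.List.enumerate_nil], by simp [stackOf, PySem.List.enumerate_nil]⟩, fun _ => rfl, ?_, ?_, ?_⟩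
    · intro e T h; rw [stackOf] at h; simp [PySem.List.enumerate_nil] at h
    · intro e he; rw [stackOf] at he; simp [PySem.List.enumerate_nil] at he
    · simp [stackOf, PySem.List.enumerate_nil, expand, refAux]
  | append_singleton arr y IH =>
    obtain ⟨hOrd, hnil, hhead, hbnd, hexp⟩ := IH
    set S := stackOf arr with hSdef
    set n : Int := (arr.length : Int) with hndef
    have h0n : 0 ≤ n := by rw [hndef]; positivity
    have hpush : stackOf (arr ++ [y]) = pvPush S y n := stackOf_append arr y
    have hKsub : List.Sublist (S.dropWhile (fun e => decide (e.1 ≤ y))) S :=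
      List.dropWhile_sublist _
    have hKgt : ∀ e ∈ S.dropWhile (fun e => decide (e.1 ≤ y)), y < e.1 := by
      cases hKc : S.dropWhile (fun e => decide (e.1 ≤ y)) with
      | nil => simp
      | cons k ks =>
        intro e he
        have hkf := List.head_dropWhile_not (fun e => decide (e.1 ≤ y)) (l := S)
          (by rw [hKc]; simp)
        have hky : y < k.1 := by simp [hKc] at hkf; omega
        rcases List.mem_cons.1 he with rfl | he'
        · exact hky
        · have hKpw := hOrd.1.sublist hKsub
          rw [hKc] at hKpw
          exact lt_trans hky ((List.pairwise_cons.1 hKpw).1 e he').1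
    have hnewlen : ((arr ++ [y]).length : Int) = n + 1 := by simp [hndef]
    rw [hpush, pvPush_eq]
    refine ⟨⟨?_, ?_⟩, ?_, ?_, ?_, ?_⟩
    · rw [List.pairwise_cons]
      exact ⟨fun e he => ⟨hKgt e he, lt_of_lt_of_le (hbnd e (hKsub.mem he)) (by omega)⟩,
        hOrd.1.sublist hKsub⟩
    · intro e he
      rcases List.mem_cons.1 he with rfl | he'
      · exact h0n
      · exact hOrd.2 e (hKsub.mem he')
    · intro h; simp at h
    · intro e T h
      rw [List.cons.injEq] at h
      rw [← h.1, hnewlen]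
      ring
    · intro e he
      rcases List.mem_cons.1 he with rfl | he'
      · rw [hnewlen]; omega
      · have := hbnd e (hKsub.mem he')
        rw [hnewlen]; omega
    · rw [← pvPush_eq, expand_push S y n hOrd hhead
          (fun h => by rw [hndef, hnil h]; rfl),
        hexp, refAux_append]
      simp [hndef]

theorem foldl_expand (R : List (Int × Int)) : ∀ (acc : List (Int × Int)) (p : Int),
    (R.foldl (fun (st : List (Int × Int) × Int) e =>
        (st.1 ++ List.replicate (e.2 - st.2).toNat e, e.2)) (acc, p)).1
      = acc ++ expand p R := by
  induction R with
  | nil => intro acc p; simp [expand]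
  | cons e T ih =>
    intro acc p
    simp only [List.foldl_cons, ih, expand, List.append_assoc]

theorem B_eq_ref (arr : List Int) : max_backward_alt arr = refAux arr 0 := by
  unfold max_backward_alt
  rw [show ((PySem.List.enumerate arr 0).foldl (fun S e => pvPush S e.2 e.1) []) = stackOf arr from rfl]
  rw [foldl_expand]
  simpa using (stack_inv arr).2.2.2.2

-- ===== VERDICT (by name: the statement is the Claim_ definition above) =====
theorem max_backward_spec : Claim_equal_max_backward := by
  intro arr _
  unfold Spec_max_backward
  rw [A_eq_ref, B_eq_ref]
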